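-- pv_equiv track=rewrite | github.com/asiya00/Python-Solved-coding-problems- | nearest_lowest_numbers_sum.py | nearest_lowest_sum
-- ===== SOURCE A (Python) =====
-- def nearest_lowest_sum(arr):
--     array = sorted(arr)
--     di = {}
--     ans = []
--     di[array[0]] = array[1]
--     for i in range(1, len(arr)-1):
--         di[array[i]] = array[i-1] + array[i+1]
--     di[array[-1]] = array[-2]
--     for j in arr:
--         ans.append(di[j])
--     return ans
-- ===== SOURCE B (Python) =====
-- def nearest_lowest_sum(arr):
--     array = sorted(arr)
--     n = len(array)
--     ans = []
--     for j in arr: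
--         # last index of j in array, via a hand-rolled bisect_right (no dict table)
--         lo, hi = 0, n
--         while lo < hi:
--             mid = (lo + hi) // 2
--             if array[mid] <= j:
--                 lo = mid + 1
--             else:
--                 hi = mid
--         L = lo - 1
--         if L == n - 1:
--             ans.append(array[-2])
--         elif L == 0:
--             ans.append(array[1])
--         else:
--             ans.append(array[L - 1] + array[L + 1])
--     return ans
-- ===== Notes on version B (the rewrite author's own statement) =====
-- stated objective: alternative
-- what changed: Replaces A's precomputed value-to-neighbor-sum dict with a per-element hand-rolled binary search (bisect_right) on the once-sorted array; the last-equal-index found by the search reproduces the dict's last-write-wins tie-break on duplicates.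
-- outside the precondition, e.g. on nearest_lowest_sum([0]): A raises IndexError, B raises IndexError; on nearest_lowest_sum([1]): A raises IndexError, B raises IndexError
import Mathlib
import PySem

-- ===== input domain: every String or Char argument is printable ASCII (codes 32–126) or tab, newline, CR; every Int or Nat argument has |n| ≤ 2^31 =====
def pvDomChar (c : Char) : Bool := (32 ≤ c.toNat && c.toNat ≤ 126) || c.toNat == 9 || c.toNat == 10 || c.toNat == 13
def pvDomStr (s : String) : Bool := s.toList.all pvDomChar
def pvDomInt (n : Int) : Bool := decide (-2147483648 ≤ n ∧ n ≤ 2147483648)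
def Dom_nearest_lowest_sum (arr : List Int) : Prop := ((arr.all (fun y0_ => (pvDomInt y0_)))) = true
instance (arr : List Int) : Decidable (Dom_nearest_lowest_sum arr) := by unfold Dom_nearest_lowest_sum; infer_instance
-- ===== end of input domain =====

-- B replaces A's precomputed value→neighbor-sum dict with a per-element hand-rolled binary search on the once-sorted array (objective: alternative, same cost).

-- ===== PORT A =====
def nearest_lowest_sum (arr : List Int) : List Int :=
  let array := PySem.List.sorted arr (fun x => x) false
  -- di[array[0]] = array[1]: array[0]/array[1] raise IndexError when len(arr) < 2 (excluded by Pre_)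
  match PySem.List.pyGet? array 0, PySem.List.pyGet? array 1 with
  | some a0, some a1 =>
    let di : PySem.Dict Int Int := PySem.Dict.empty.insert a0 a1
    -- for i in range(1, len(arr)-1): di[array[i]] = array[i-1] + array[i+1]  (all indices in range here)
    let di := (PySem.List.pyRange 1 ((arr.length : Int) - 1) 1).foldl
      (fun d i => d.insert (PySem.List.pyGetD array i 0)
        (PySem.List.pyGetD array (i - 1) 0 + PySem.List.pyGetD array (i + 1) 0)) di
    let di := di.insert (PySem.List.pyGetD array (-1) 0) (PySem.List.pyGetD array (-2) 0)
    -- for j in arr: ans.append(di[j])  (every j is a key when len(arr) ≥ 2, so no KeyError)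
    arr.map (fun j => di.getD j 0)
  | _, _ => []

-- ===== PORT B =====
-- the while-loop of Source B; lo, hi stay nonnegative so Nat and Nat division match Python's ints
-- and floor division here; array[mid] with 0 ≤ mid < hi ≤ len(array) is always in range
-- fuel makes the loop structurally recursive (kernel-reducible); it never runs out, since
-- hi - lo shrinks at every step and the call site passes fuel = n ≥ hi - lo
def pvBisect (array : List Int) (j : Int) : Nat → Nat → Nat → Nat
  | 0, lo, _ => lo
  | fuel + 1, lo, hi =>
    if lo < hi then
      -- mid = (lo + hi) // 2
      if array.getD ((lo + hi) / 2) 0 ≤ j then pvBisect array j fuel ((lo + hi) / 2 + 1) hi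
      else pvBisect array j fuel lo ((lo + hi) / 2)
    else lo

def nearest_lowest_sum_alt (arr : List Int) : List Int :=
  let array := PySem.List.sorted arr (fun x => x) false
  let n := array.length
  arr.map (fun j =>
    -- L = lo - 1, the last index of j in array
    let L : Int := (pvBisect array j n 0 n : Int) - 1
    if L = (n : Int) - 1 then PySem.List.pyGetD array (-2) 0
    else if L = 0 then PySem.List.pyGetD array 1 0
    else PySem.List.pyGetD array (L - 1) 0 + PySem.List.pyGetD array (L + 1) 0)

-- ===== PRECONDITION & SPEC =====
-- Python A evaluates array[0] and array[1] first, so it raises IndexError whenever len(arr) < 2.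
def Pre_nearest_lowest_sum (arr : List Int) : Prop := 2 ≤ arr.length
instance (arr : List Int) : Decidable (Pre_nearest_lowest_sum arr) := by unfold Pre_nearest_lowest_sum; infer_instance
def pvWitness_nearest_lowest_sum : List Int := [3, 1, 2]

def Spec_nearest_lowest_sum (arr : List Int) (out : List Int) : Prop := out = nearest_lowest_sum_alt arr
instance (arr : List Int) (out : List Int) : Decidable (Spec_nearest_lowest_sum arr out) := by unfold Spec_nearest_lowest_sum; infer_instance

-- ===== CLAIM (what is proved, stated in full; the proofs are below) =====
def Claim_equal_nearest_lowest_sum : Prop := ∀ (arr : List Int), Dom_nearest_lowest_sum arr → Pre_nearest_lowest_sum arr → Spec_nearest_lowest_sum arr (nearest_lowest_sum arr)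

-- ===== LEMMAS AND PROOFS =====

-- monotonicity of a (≤)-sorted list, phrased with getD
theorem pvSorted_getD_mono (array : List Int)
    (hs : array.Pairwise (· ≤ ·)) :
    ∀ p q : Nat, p ≤ q → q < array.length → array.getD p 0 ≤ array.getD q 0 := by
  intro p q hpq hq
  rcases Nat.eq_or_lt_of_le hpq with h | h
  · subst h; exact le_refl _
  · have hpl : p < array.length := by omega
    have := (List.pairwise_iff_getElem.mp hs) p q hpl hq h
    rw [List.getD_eq_getElem _ _ hpl, List.getD_eq_getElem _ _ hq]
    exact this

-- the binary-search loop lands on the partition point of (· ≤ j)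
theorem pvBisect_pp (array : List Int) (j : Int)
    (hs : ∀ p q : Nat, p ≤ q → q < array.length → array.getD p 0 ≤ array.getD q 0) :
    ∀ (k lo hi : Nat), hi - lo ≤ k → lo ≤ hi → hi ≤ array.length →
      (∀ i, i < lo → array.getD i 0 ≤ j) →
      (∀ i, hi ≤ i → i < array.length → j < array.getD i 0) →
      (pvBisect array j k lo hi ≤ array.length ∧
       (∀ i, i < pvBisect array j k lo hi → array.getD i 0 ≤ j) ∧
       (∀ i, pvBisect array j k lo hi ≤ i → i < array.length → j < array.getD i 0)) := by
  intro k
  induction k with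
  | zero =>
    intro lo hi hk hle hhi hlow hup
    simp only [pvBisect]
    exact ⟨by omega, hlow, fun i h1 h2 => hup i (by omega) h2⟩
  | succ k ih =>
    intro lo hi hk hle hhi hlow hup
    by_cases hlt : lo < hi
    · rw [pvBisect, if_pos hlt]
      have hm1 : lo ≤ (lo + hi) / 2 := by omega
      have hm2 : (lo + hi) / 2 < hi := by omega
      by_cases hc : array.getD ((lo + hi) / 2) 0 ≤ j
      · rw [if_pos hc]
        exact ih ((lo + hi) / 2 + 1) hi (by omega) (by omega) hhi
          (fun i hi' => le_trans (hs i ((lo + hi) / 2) (by omega) (by omega)) hc) hup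
      · rw [if_neg hc]
        exact ih lo ((lo + hi) / 2) (by omega) (by omega) (by omega) hlow
          (fun i hmi hil => lt_of_lt_of_le (not_le.mp hc) (hs ((lo + hi) / 2) i hmi hil))
    · rw [pvBisect, if_neg hlt]
      exact ⟨by omega, hlow, fun i h1 h2 => hup i (by omega) h2⟩

-- if j occurs in the list, the partition point r satisfies 1 ≤ r and array[r-1] = j
theorem pvPP_mem (array : List Int) (j : Int) (r : Nat)
    (hs : ∀ p q : Nat, p ≤ q → q < array.length → array.getD p 0 ≤ array.getD q 0)
    (hrn : r ≤ array.length)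
    (hlo : ∀ i, i < r → array.getD i 0 ≤ j)
    (hub : ∀ i, r ≤ i → i < array.length → j < array.getD i 0)
    (hj : j ∈ array) :
    1 ≤ r ∧ array.getD (r - 1) 0 = j := by
  obtain ⟨i, hi, hieq⟩ := List.mem_iff_getElem.mp hj
  have hgi : array.getD i 0 = j := by rw [List.getD_eq_getElem _ _ hi]; exact hieq
  have hir : i < r := by
    by_contra hcon
    have := hub i (by omega) hi
    rw [hgi] at this; exact lt_irrefl _ this
  refine ⟨by omega, ?_⟩
  have h1 : array.getD (r - 1) 0 ≤ j := hlo (r - 1) (by omega)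
  have h2 : array.getD i 0 ≤ array.getD (r - 1) 0 := hs i (r - 1) (by omega) (by omega)
  rw [hgi] at h2
  exact le_antisymm h1 h2

-- the dict built by the fold over range(1, m) looks up j at the last write for key j
theorem pvFoldA (array : List Int) (j : Int) (r : Nat)
    (hub : ∀ i, r ≤ i → i < array.length → j < array.getD i 0)
    (hone : 1 ≤ r) (hrj : array.getD (r - 1) 0 = j) :
    ∀ t : Nat, (t + 1 : Nat) ≤ array.length - 1 → r ≤ t + 1 →
      ((PySem.List.pyRange 1 ((t + 1 : Nat) : Int) 1).foldl
        (fun d i => d.insert (PySem.List.pyGetD array i 0)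
          (PySem.List.pyGetD array (i - 1) 0 + PySem.List.pyGetD array (i + 1) 0))
        (PySem.Dict.empty.insert (array.getD 0 0) (array.getD 1 0))).getD j 0
      = if 2 ≤ r then array.getD (r - 2) 0 + array.getD r 0 else array.getD 1 0 := by
  intro t
  induction t with
  | zero =>
    intro hlen hr
    have hr1 : r = 1 := by omega
    subst hr1
    rw [show ((0 + 1 : Nat) : Int) = 1 by norm_num]
    rw [PySem.List.pyRange_one_eq_nil (by norm_num)]
    simp only [List.foldl_nil]
    rw [PySem.Dict.getD_insert]
    have hkey : j = array.getD 0 0 := by simpa using hrj.symm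
    rw [if_pos hkey]
    norm_num
  | succ t ih =>
    intro hlen hr
    have hcast : ((t + 1 + 1 : Nat) : Int) = ((t + 1 : Nat) : Int) + 1 := by push_cast; ring
    rw [hcast, PySem.List.pyRange_one_succ_right (by push_cast; omega)]
    rw [List.foldl_append]
    simp only [List.foldl_cons, List.foldl_nil]
    have e2 : ((t + 1 : Nat) : Int) - 1 = ((t : Nat) : Int) := by push_cast; ring
    have e3 : ((t + 1 : Nat) : Int) + 1 = ((t + 2 : Nat) : Int) := by push_cast; ring
    rw [e2, e3]
    simp only [PySem.List.pyGetD_natCast]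
    rw [PySem.Dict.getD_insert]
    have htlen : t + 1 < array.length := by omega
    by_cases hkey : j = array.getD (t + 1) 0
    · rw [if_pos hkey]
      have hrt : r = t + 2 := by
        by_contra hne
        have hrle : r ≤ t + 1 := by omega
        have := hub (t + 1) (by omega) htlen
        rw [← hkey] at this; exact lt_irrefl _ this
      rw [if_pos (by omega : 2 ≤ r), hrt]
      norm_num
    · rw [if_neg hkey]
      have hrle : r ≤ t + 1 := by
        by_contra hcon
        have hrt : r = t + 2 := by omega
        rw [hrt] at hrj
        rw [show t + 2 - 1 = t + 1 from by omega] at hrj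
        exact hkey hrj.symm
      exact ih (by omega) hrle

-- ===== VERDICT (by name: the statement is the Claim_ definition above) =====
theorem nearest_lowest_sum_spec : Claim_equal_nearest_lowest_sum := by
  intro arr _ hpre
  unfold Pre_nearest_lowest_sum at hpre
  unfold Spec_nearest_lowest_sum
  simp only [nearest_lowest_sum, nearest_lowest_sum_alt]
  generalize hA : PySem.List.sorted arr (fun x => x) false = array
  have hlen : array.length = arr.length := by
    rw [← hA]; exact PySem.List.length_sorted arr (fun x => x) false
  have hn : 2 ≤ array.length := by omega
  have hpw : array.Pairwise (· ≤ ·) := by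
    rw [← hA]; simpa using PySem.List.sorted_pairwise (xs := arr) (key := fun x => x)
  have hs := pvSorted_getD_mono array hpw
  have h0 : PySem.List.pyGet? array 0 = some (array.getD 0 0) := by
    rw [PySem.List.pyGet?_zero, List.getElem?_eq_getElem (by omega : 0 < array.length),
      List.getD_eq_getElem _ _ (by omega : 0 < array.length)]
  have h1 : PySem.List.pyGet? array 1 = some (array.getD 1 0) := by
    rw [show (1 : Int) = ((1 : Nat) : Int) by norm_num, PySem.List.pyGet?_natCast,
      List.getElem?_eq_getElem (by omega : 1 < array.length),
      List.getD_eq_getElem _ _ (by omega : 1 < array.length)]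
  simp only [h0, h1]
  rw [show ((arr.length : Int) - 1) = (((array.length - 2 : Nat) + 1 : Nat) : Int) by omega]
  apply List.map_congr_left
  intro j hj
  have hjarr : j ∈ array := by rw [← hA]; exact (PySem.List.mem_sorted arr (fun x => x) false j).mpr hj
  obtain ⟨hrn, hlo, hub⟩ := pvBisect_pp array j hs array.length 0 array.length
    (by omega) (by omega) le_rfl
    (fun i h => absurd h (Nat.not_lt_zero i))
    (fun i h1 h2 => absurd h2 (by omega))
  set r := pvBisect array j array.length 0 array.length with hrdef
  obtain ⟨hr1, hrj⟩ := pvPP_mem array j r hs hrn hlo hub hjarr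
  have em1 : PySem.List.pyGetD array (-1) 0 = array.getD (array.length - 1) 0 := by
    rw [PySem.List.pyGetD_neg_one array 0 (by intro h; rw [h] at hn; simp at hn),
      List.getLast_eq_getElem, List.getD_eq_getElem _ _ (by omega)]
  have em2 : PySem.List.pyGetD array (-2) 0 = array.getD (array.length - 2) 0 := by
    rw [PySem.List.pyGetD_neg_ofNat array 2 0 (by omega) (by omega),
      List.getD_eq_getElem _ _ (by omega)]
  rw [em1, em2, PySem.Dict.getD_insert]
  have hreq : (j = array.getD (array.length - 1) 0) ↔ r = array.length := by
    constructor
    · intro h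
      by_contra hne
      have := hub (array.length - 1) (by omega) (by omega)
      rw [← h] at this; exact lt_irrefl _ this
    · intro h
      rw [h] at hrj; exact hrj.symm
  by_cases hlast : j = array.getD (array.length - 1) 0
  · rw [if_pos hlast]
    have hrlen : r = array.length := hreq.mp hlast
    rw [if_pos (by rw [hrlen])]
  · rw [if_neg hlast]
    have hrlt : r ≤ array.length - 1 := by
      have : r ≠ array.length := fun h => hlast (hreq.mpr h)
      omega
    rw [pvFoldA array j r hub hr1 hrj (array.length - 2) (by omega) (by omega)]
    have hne1 : ¬((r : Int) - 1 = (array.length : Int) - 1) := by omega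
    rw [if_neg hne1]
    by_cases h2r : 2 ≤ r
    · have hne0 : ¬((r : Int) - 1 = 0) := by omega
      rw [if_pos h2r, if_neg hne0]
      rw [show ((r : Int) - 1 - 1) = ((r - 2 : Nat) : Int) by omega,
        show ((r : Int) - 1 + 1) = ((r : Nat) : Int) by omega]
      simp only [PySem.List.pyGetD_natCast]
    · rw [if_neg h2r, if_pos (show (r : Int) - 1 = 0 from by omega)]
      rw [show (1 : Int) = ((1 : Nat) : Int) by norm_num, PySem.List.pyGetD_natCast]
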